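/- GENERATED by c/gen_decode.py: decode facts of the image, one per distinct instruction byte string. -/
import UserX.DecodeImage

#decode_all ProgX.Base.Dec
  "3dff030000"  -- cmp eax,0x3ff
  "4829d0"  -- sub rax,rdx
  "4885ff"  -- test rdi,rdi
  "4889f9"  -- mov rcx,rdi
  "48c1e803"  -- shr rax,0x3
  "4989ff"  -- mov r15,rdi
  "4d85ed"  -- test r13,r13
  "660f2fe1"  -- comisd xmm4,xmm1
  "7410"  -- je 103539
  "7716"  -- ja 10321f
  "81ff02fcffff"  -- cmp edi,0xfffffc02
  "bb02fcffff"  -- mov ebx,0xfffffc02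
  "e855faffff"  -- call 101d00
  "e8caf9ffff"  -- call 100059
  "eb18"  -- jmp 1018fa
  "f20f100d08e00300"  -- movsd xmm1,QWORD PTR [rip+0x3e008]
  "f20f58cb"  -- addsd xmm1,xmm3
  "f20f5c0dacdc0300"  -- subsd xmm1,QWORD PTR [rip+0x3dcac]
  "f20f5e1dd7da0300"  -- divsd xmm3,QWORD PTR [rip+0x3dad7]
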